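-- pv_equiv track=rewrite | github.com/Stijn-Jacobs/AdventOfCode-Python | 2021/11/code.py | increase_energy
-- ===== SOURCE A (Python) =====
-- def increase_energy(map, x, y, flashed_map, increased_map, forced=False):
--     if flashed_map.get((x, y), False):
--         return 0
--     # Check bounds
--     if 0 <= y < len(map) and 0 <= x < len(map[y]):
--         if map[y][x] >= 9:
--             flashes = 0
--             flashed_map[(x, y)] = True
--             # Flash surroundings
--             for xmod in range(-1, 2):
--                 for ymod in range(-1, 2):
--                     newx = x + xmod
--                     newy = y + ymod
--                     flashes += increase_energy(map, newx, newy, flashed_map, increased_map, True)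
--             return flashes + 1
--         elif forced or not increased_map.get((x, y), False):
--             map[y][x] = map[y][x] + 1
--             if not forced:
--                 increased_map[(x, y)] = True
--     return 0
-- ===== SOURCE B (Python) =====
-- def increase_energy(map, x, y, flashed_map, increased_map, forced=False):
--     # Iterative flood-fill: explicit stack of (x, y, forced) entries replaces the
--     # recursion; a running counter replaces the summed return values. Neighbors are
--     # pushed in reverse so LIFO pops reproduce the recursion's pre-order DFS.
--     flashes = 0
--     stack = [(x, y, forced)]
--     while stack:
--         cx, cy, cforced = stack.pop()
--         if flashed_map.get((cx, cy), False):
--             continue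
--         if 0 <= cy < len(map) and 0 <= cx < len(map[cy]):
--             if map[cy][cx] >= 9:
--                 flashed_map[(cx, cy)] = True
--                 flashes += 1
--                 stack.extend((cx + xmod, cy + ymod, True)
--                              for xmod in range(1, -2, -1)
--                              for ymod in range(1, -2, -1))
--             elif cforced or not increased_map.get((cx, cy), False):
--                 map[cy][cx] = map[cy][cx] + 1
--                 if not cforced:
--                     increased_map[(cx, cy)] = True
--     return flashes
-- ===== Notes on version B (the rewrite author's own statement) =====
-- stated objective: alternative
-- what changed: The recursive flood-fill is replaced by an iterative loop over an explicit stack of (x, y, forced) entries with a running flash counter; neighbors are pushed in reverse so LIFO pops reproduce the recursion's pre-order DFS, and the summed recursive return values become a single accumulator.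
import Mathlib
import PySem

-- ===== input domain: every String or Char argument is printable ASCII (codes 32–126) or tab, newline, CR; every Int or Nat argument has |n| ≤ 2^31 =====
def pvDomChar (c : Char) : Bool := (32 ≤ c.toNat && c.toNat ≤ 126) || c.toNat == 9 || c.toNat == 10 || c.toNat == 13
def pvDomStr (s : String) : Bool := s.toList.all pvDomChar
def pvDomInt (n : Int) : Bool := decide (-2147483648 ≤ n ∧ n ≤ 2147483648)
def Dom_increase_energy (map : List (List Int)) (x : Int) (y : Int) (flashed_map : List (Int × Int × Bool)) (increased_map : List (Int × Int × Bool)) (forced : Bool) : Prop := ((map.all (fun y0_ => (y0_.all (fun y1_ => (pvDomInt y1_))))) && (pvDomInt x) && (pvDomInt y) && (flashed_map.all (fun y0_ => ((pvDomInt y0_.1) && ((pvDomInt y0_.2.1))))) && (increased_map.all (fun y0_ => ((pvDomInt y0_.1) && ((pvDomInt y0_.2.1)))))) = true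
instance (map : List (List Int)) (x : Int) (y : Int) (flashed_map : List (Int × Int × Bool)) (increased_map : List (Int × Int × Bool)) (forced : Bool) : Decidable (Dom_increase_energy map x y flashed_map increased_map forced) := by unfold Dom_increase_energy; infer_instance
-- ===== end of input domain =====

-- B replaces the recursive flood-fill by an iterative explicit stack with a running flash
-- counter (same visit order, so the same result); equivalence proved for the RETURN value —
-- both Pythons mutate map/flashed_map/increased_map in place, and identically.

-- ===== PORT A =====
-- dict .get((x,y), False) on the flattened association list (first match; Python dicts have unique keys)
def pvFmGet (d : List (Int × Int × Bool)) (x y : Int) : Bool :=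
  match d with
  | [] => false
  | (a, b, v) :: t => if a = x && b = y then v else pvFmGet t x y

-- dict assignment d[(x,y)] = v : overwrite first match in place, else append
def pvFmSet (d : List (Int × Int × Bool)) (x y : Int) (v : Bool) : List (Int × Int × Bool) :=
  match d with
  | [] => [(x, y, v)]
  | (a, b, w) :: t => if a = x && b = y then (x, y, v) :: t else (a, b, w) :: pvFmSet t x y v

-- 0 <= y < len(map) and 0 <= x < len(map[y])
def pvInB (m : List (List Int)) (x y : Int) : Bool :=
  decide (0 ≤ y) && decide (y < (m.length : Int)) && decide (0 ≤ x) && decide (x < ((m.getD y.toNat []).length : Int))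

-- map[y][x], only read in bounds
def pvCell (m : List (List Int)) (x y : Int) : Int := (m.getD y.toNat []).getD x.toNat 0

-- map[y][x] = map[y][x] + 1, only in bounds
def pvBump (m : List (List Int)) (x y : Int) : List (List Int) :=
  m.set y.toNat ((m.getD y.toNat []).set x.toNat (pvCell m x y + 1))

-- the 9 (x+xmod, y+ymod) pairs, xmod outer, ymod inner, each over range(-1, 2)
def pvNbrs (x y : Int) : List (Int × Int) :=
  ([-1, 0, 1] : List Int).flatMap (fun xm => ([-1, 0, 1] : List Int).map (fun ym => (x + xm, y + ym)))

-- fuel bound for the recursion: number of in-bounds cells not yet flashed (each flash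
-- permanently marks one such cell, so the recursion depth is at most this + 1)
def pvMu (ds : List Nat) (fm : List (Int × Int × Bool)) : Nat :=
  ((List.range ds.length).map (fun j =>
    ((List.range (ds.getD j 0)).map (fun i => if pvFmGet fm ((i : Nat) : Int) ((j : Nat) : Int) then 0 else 1)).sum)).sum

-- the for xmod/for ymod loop: sequential recursive calls (forced=True), summing the flashes
def runAList
    (rec : List (List Int) → List (Int × Int × Bool) → List (Int × Int × Bool) → Int → Int →
      Option (Int × List (List Int) × List (Int × Int × Bool) × List (Int × Int × Bool)))
    (cs : List (Int × Int)) (m : List (List Int)) (fm im : List (Int × Int × Bool)) :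
    Option (Int × List (List Int) × List (Int × Int × Bool) × List (Int × Int × Bool)) :=
  match cs with
  | [] => some (0, m, fm, im)
  | (cx, cy) :: t =>
    match rec m fm im cx cy with
    | none => none
    | some (v, m1, fm1, im1) =>
      match runAList rec t m1 fm1 im1 with
      | none => none
      | some (s, m2, fm2, im2) => some (v + s, m2, fm2, im2)

-- literal transliteration of A's body; fuel only makes the recursion total (never exhausted, see pvTotA)
def runA (fuel : Nat) (m : List (List Int)) (fm im : List (Int × Int × Bool)) (x y : Int) (forced : Bool) :
    Option (Int × List (List Int) × List (Int × Int × Bool) × List (Int × Int × Bool)) :=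
  match fuel with
  | 0 => none
  | n + 1 =>
    if pvFmGet fm x y then some (0, m, fm, im)
    else if pvInB m x y then
      if 9 ≤ pvCell m x y then
        match runAList (fun m' fm' im' cx cy => runA n m' fm' im' cx cy true) (pvNbrs x y) m (pvFmSet fm x y true) im with
        | none => none
        | some (s, m', fm', im') => some (s + 1, m', fm', im')
      else if forced || !(pvFmGet im x y) then
        if forced then some (0, pvBump m x y, fm, im)
        else some (0, pvBump m x y, fm, pvFmSet im x y true)
      else some (0, m, fm, im)
    else some (0, m, fm, im)

def increase_energy (map : List (List Int)) (x : Int) (y : Int) (flashed_map : List (Int × Int × Bool)) (increased_map : List (Int × Int × Bool)) (forced : Bool) : Int :=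
  match runA (pvMu (List.map List.length map) flashed_map + 1) map flashed_map increased_map x y forced with
  | some (c, _, _, _) => c
  | none => 0

-- ===== PORT B =====
-- Source B's while loop over the explicit stack (list head = top of stack; extending with the
-- REVERSED 9-neighbor generator and popping LIFO = prepending the neighbors in order);
-- fuel only makes the loop total (never exhausted, see the simulation lemmas)
def runB (fuel : Nat) (stack : List (Int × Int × Bool)) (m : List (List Int)) (fm im : List (Int × Int × Bool)) (c : Int) :
    Option (Int × List (List Int) × List (Int × Int × Bool) × List (Int × Int × Bool)) :=
  match fuel with
  | 0 => none
  | n + 1 =>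
    match stack with
    | [] => some (c, m, fm, im)
    | (x, y, f) :: rest =>
      if pvFmGet fm x y then runB n rest m fm im c
      else if pvInB m x y && decide (9 ≤ pvCell m x y) then
        runB n ((pvNbrs x y).map (fun p => (p.1, p.2, true)) ++ rest) m (pvFmSet fm x y true) im (c + 1)
      else if pvInB m x y && (f || !(pvFmGet im x y)) then
        runB n rest (pvBump m x y) fm (if f then im else pvFmSet im x y true) c
      else runB n rest m fm im c

def increase_energy_alt (map : List (List Int)) (x : Int) (y : Int) (flashed_map : List (Int × Int × Bool)) (increased_map : List (Int × Int × Bool)) (forced : Bool) : Int :=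
  match runB (9 * pvMu (List.map List.length map) flashed_map + 2) [(x, y, forced)] map flashed_map increased_map 0 with
  | some (c, _, _, _) => c
  | none => 0

-- ===== PRECONDITION & SPEC =====
def Spec_increase_energy (map : List (List Int)) (x : Int) (y : Int) (flashed_map : List (Int × Int × Bool)) (increased_map : List (Int × Int × Bool)) (forced : Bool) (out : Int) : Prop := out = increase_energy_alt map x y flashed_map increased_map forced
instance (map : List (List Int)) (x : Int) (y : Int) (flashed_map : List (Int × Int × Bool)) (increased_map : List (Int × Int × Bool)) (forced : Bool) (out : Int) : Decidable (Spec_increase_energy map x y flashed_map increased_map forced out) := by unfold Spec_increase_energy; infer_instance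

-- ===== CLAIM (what is proved, stated in full; the proofs are below) =====
def Claim_equal_increase_energy : Prop := ∀ (map : List (List Int)) (x : Int) (y : Int) (flashed_map : List (Int × Int × Bool)) (increased_map : List (Int × Int × Bool)) (forced : Bool), Dom_increase_energy map x y flashed_map increased_map forced → Spec_increase_energy map x y flashed_map increased_map forced (increase_energy map x y flashed_map increased_map forced)

-- ===== LEMMAS AND PROOFS =====

-- lookup after an overwrite/append
theorem pvFmGet_pvFmSet (d : List (Int × Int × Bool)) (x y : Int) (v : Bool) (a b : Int) :
    pvFmGet (pvFmSet d x y v) a b = if a = x ∧ b = y then v else pvFmGet d a b := by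
  induction d with
  | nil =>
    by_cases h : a = x ∧ b = y
    · obtain ⟨h1, h2⟩ := h; subst h1; subst h2; simp [pvFmSet, pvFmGet]
    · simp [pvFmSet, pvFmGet, h]
      intro h1 h2; exact absurd ⟨h1.symm, h2.symm⟩ h
  | cons hd t ih =>
    obtain ⟨p, q, w⟩ := hd
    by_cases hpq : p = x ∧ q = y
    · obtain ⟨h1, h2⟩ := hpq; subst h1; subst h2
      simp only [pvFmSet, decide_true, Bool.and_self, if_true]
      by_cases h : a = p ∧ b = q
      · obtain ⟨h1, h2⟩ := h; subst h1; subst h2; simp [pvFmGet]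
      · have hb : (decide (p = a) && decide (q = b)) = false := by
          by_contra hc
          simp only [Bool.not_eq_false, Bool.and_eq_true, decide_eq_true_eq] at hc
          exact h ⟨hc.1.symm, hc.2.symm⟩
        simp only [pvFmGet, hb, Bool.false_eq_true, if_false, h]
    · have hb : (decide (p = x) && decide (q = y)) = false := by
        simp [decide_eq_true_eq]; intro h1 h2; exact absurd ⟨h1, h2⟩ hpq
      simp only [pvFmSet, hb, Bool.false_eq_true, if_false, pvFmGet, ih]
      by_cases hc : (decide (p = a) && decide (q = b)) = true
      · simp only [hc, if_true]
        simp only [Bool.and_eq_true, decide_eq_true_eq] at hc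
        have : ¬(a = x ∧ b = y) := by
          rintro ⟨rfl, rfl⟩; exact hpq ⟨hc.1, hc.2⟩
        simp [this]
      · simp [hc]

-- pvBump preserves the shape of the grid
theorem pvDims_pvBump (m : List (List Int)) (x y : Int) :
    List.map List.length (pvBump m x y) = List.map List.length m := by
  unfold pvBump
  rcases Nat.lt_or_ge y.toNat m.length with h | h
  · rw [List.map_set]
    have hrow : (m.getD y.toNat []) = m[y.toNat] := by
      rw [List.getD_eq_getElem?_getD, List.getElem?_eq_getElem h]; rfl
    rw [List.length_set, hrow]
    have h2 : (List.map List.length m)[y.toNat]'(by simpa using h) = m[y.toNat].length := by simp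
    calc (List.map List.length m).set y.toNat m[y.toNat].length
        = (List.map List.length m).set y.toNat ((List.map List.length m)[y.toNat]'(by simpa using h)) := by rw [h2]
      _ = List.map List.length m := List.set_getElem_self ..
  · rw [List.set_eq_of_length_le (by simpa using h)]

theorem pvDs_getD (m : List (List Int)) (j : Nat) (h : j < m.length) :
    (List.map List.length m).getD j 0 = (m.getD j []).length := by
  rw [List.getD_eq_getElem?_getD, List.getD_eq_getElem?_getD, List.getElem?_map, List.getElem?_eq_getElem h]
  rfl

-- generic: pointwise ≤ with one strict point gives sum + 1 ≤ sum
theorem pvSum_point_lt {α : Type} (l : List α) (a : α) (f g : α → Nat)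
    (ha : a ∈ l) (hnd : l.Nodup)
    (hle : ∀ b ∈ l, g b ≤ f b) (hlt : g a + 1 ≤ f a) :
    (l.map g).sum + 1 ≤ (l.map f).sum := by
  induction l with
  | nil => cases ha
  | cons hd t ih =>
    simp only [List.map_cons, List.sum_cons]
    rcases List.mem_cons.mp ha with rfl | hat
    · have : (t.map g).sum ≤ (t.map f).sum :=
        List.sum_le_sum (fun b hb => hle b (List.mem_cons_of_mem _ hb))
      omega
    · have h1 : g hd ≤ f hd := hle hd List.mem_cons_self
      have h2 := ih hat hnd.of_cons (fun b hb => hle b (List.mem_cons_of_mem _ hb))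
      omega

theorem pvMu_set_lt (ds : List Nat) (fm : List (Int × Int × Bool)) (x y : Int)
    (hy0 : 0 ≤ y) (hy : y.toNat < ds.length) (hx0 : 0 ≤ x) (hx : x.toNat < ds.getD y.toNat 0)
    (hget : pvFmGet fm x y = false) :
    pvMu ds (pvFmSet fm x y true) + 1 ≤ pvMu ds fm := by
  unfold pvMu
  apply pvSum_point_lt (a := y.toNat)
  · exact List.mem_range.mpr hy
  · exact List.nodup_range
  · intro j _
    refine List.sum_le_sum (fun i _ => ?_)
    rw [pvFmGet_pvFmSet]
    split_ifs <;> simp_all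
  · apply pvSum_point_lt (a := x.toNat)
    · exact List.mem_range.mpr hx
    · exact List.nodup_range
    · intro i _
      rw [pvFmGet_pvFmSet]
      split_ifs <;> simp_all
    · rw [pvFmGet_pvFmSet]
      have hxx : ((x.toNat : Nat) : Int) = x := Int.toNat_of_nonneg hx0
      have hyy : ((y.toNat : Nat) : Int) = y := Int.toNat_of_nonneg hy0
      simp [hxx, hyy, hget]

-- the invariant carried by A's recursion
def pvInv (m : List (List Int)) (fm : List (Int × Int × Bool)) (c : Int)
    (m' : List (List Int)) (fm' : List (Int × Int × Bool)) : Prop :=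
  List.map List.length m' = List.map List.length m ∧
  (∀ a b, pvFmGet fm a b = true → pvFmGet fm' a b = true) ∧
  0 ≤ c ∧
  pvMu (List.map List.length m) fm' + c.toNat ≤ pvMu (List.map List.length m) fm

theorem pvInv_refl (m : List (List Int)) (fm : List (Int × Int × Bool)) : pvInv m fm 0 m fm :=
  ⟨rfl, fun _ _ h => h, le_refl 0, by omega⟩

theorem pvInv_bump (m : List (List Int)) (fm : List (Int × Int × Bool)) (x y : Int) :
    pvInv m fm 0 (pvBump m x y) fm :=
  ⟨pvDims_pvBump m x y, fun _ _ h => h, le_refl 0, by omega⟩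

theorem pvInv_trans {m : List (List Int)} {fm : List (Int × Int × Bool)} {v : Int}
    {m1 : List (List Int)} {fm1 : List (Int × Int × Bool)} {s : Int}
    {m2 : List (List Int)} {fm2 : List (Int × Int × Bool)}
    (h1 : pvInv m fm v m1 fm1) (h2 : pvInv m1 fm1 s m2 fm2) : pvInv m fm (v + s) m2 fm2 := by
  obtain ⟨d1, g1, n1, u1⟩ := h1
  obtain ⟨d2, g2, n2, u2⟩ := h2
  refine ⟨d2.trans d1, fun a b h => g2 a b (g1 a b h), by omega, ?_⟩
  rw [d1] at u2
  omega

theorem pvInvList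
    (rec : List (List Int) → List (Int × Int × Bool) → List (Int × Int × Bool) → Int → Int →
      Option (Int × List (List Int) × List (Int × Int × Bool) × List (Int × Int × Bool)))
    (hrec : ∀ m fm im cx cy r, rec m fm im cx cy = some r → pvInv m fm r.1 r.2.1 r.2.2.1) :
    ∀ (cs : List (Int × Int)) (m : List (List Int)) (fm im : List (Int × Int × Bool)) r,
      runAList rec cs m fm im = some r → pvInv m fm r.1 r.2.1 r.2.2.1 := by
  intro cs
  induction cs with
  | nil =>
    intro m fm im r hr
    simp only [runAList, Option.some.injEq] at hr
    subst hr; exact pvInv_refl m fm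
  | cons hd t ih =>
    obtain ⟨cx, cy⟩ := hd
    intro m fm im r hr
    rw [runAList] at hr
    cases h1 : rec m fm im cx cy with
    | none => simp only [h1] at hr; exact absurd hr (by simp)
    | some r1 =>
      obtain ⟨v, m1, fm1, im1⟩ := r1
      simp only [h1] at hr
      cases h2 : runAList rec t m1 fm1 im1 with
      | none => simp only [h2] at hr; exact absurd hr (by simp)
      | some r2 =>
        obtain ⟨s, m2, fm2, im2⟩ := r2
        simp only [h2, Option.some.injEq] at hr
        subst hr
        have ha : pvInv m fm v m1 fm1 := hrec _ _ _ _ _ _ h1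
        have hb : pvInv m1 fm1 s m2 fm2 := ih _ _ _ _ h2
        exact pvInv_trans ha hb

theorem pvInvA : ∀ (n : Nat) (m : List (List Int)) (fm im : List (Int × Int × Bool)) (x y : Int) (f : Bool)
    (r : Int × List (List Int) × List (Int × Int × Bool) × List (Int × Int × Bool)),
    runA n m fm im x y f = some r → pvInv m fm r.1 r.2.1 r.2.2.1 := by
  intro n
  induction n with
  | zero => intro m fm im x y f r hr; cases hr
  | succ n ih =>
    intro m fm im x y f r hr
    rw [runA] at hr
    by_cases h1 : pvFmGet fm x y = true
    · simp only [h1, if_true, Option.some.injEq] at hr; subst hr; exact pvInv_refl m fm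
    · simp only [h1, Bool.false_eq_true, if_false] at hr
      by_cases h2 : pvInB m x y = true
      · simp only [h2, if_true] at hr
        by_cases h3 : (9 : Int) ≤ pvCell m x y
        · simp only [h3, if_true] at hr
          cases hres : runAList (fun m' fm' im' cx cy => runA n m' fm' im' cx cy true)
              (pvNbrs x y) m (pvFmSet fm x y true) im with
          | none => simp only [hres] at hr; exact absurd hr (by simp)
          | some r1 =>
            obtain ⟨s, m', fm', im'⟩ := r1
            simp only [hres, Option.some.injEq] at hr
            subst hr
            have hinv : pvInv m (pvFmSet fm x y true) s m' fm' :=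
              pvInvList _ (fun m fm im cx cy r hrc => ih m fm im cx cy true r hrc)
                (pvNbrs x y) m (pvFmSet fm x y true) im _ hres
            obtain ⟨d1, g1, n1, u1⟩ := hinv
            simp only [pvInB, Bool.and_eq_true, decide_eq_true_eq] at h2
            obtain ⟨⟨⟨hy0, hyl⟩, hx0⟩, hxl⟩ := h2
            have hyN : y.toNat < m.length := by omega
            have hyN' : y.toNat < (List.map List.length m).length := by simpa using hyN
            have hxN : x.toNat < (List.map List.length m).getD y.toNat 0 := by
              rw [pvDs_getD m y.toNat hyN]; omega
            have hset := pvMu_set_lt (List.map List.length m) fm x y hy0 hyN' hx0 hxN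
              (by simpa using h1)
            show pvInv m fm (s + 1) m' fm'
            refine ⟨d1, ?_, by omega, by omega⟩
            intro a b hab
            apply g1
            rw [pvFmGet_pvFmSet]
            split_ifs with hcond
            · rfl
            · exact hab
        · simp only [h3, if_false] at hr
          by_cases h4 : (f || !(pvFmGet im x y)) = true
          · simp only [h4, if_true] at hr
            cases f with
            | true =>
              simp only [if_true, Option.some.injEq] at hr
              subst hr; exact pvInv_bump m fm x y
            | false =>
              simp only [Bool.false_eq_true, if_false, Option.some.injEq] at hr
              subst hr; exact pvInv_bump m fm x y
          · simp only [h4, Bool.false_eq_true, if_false, Option.some.injEq] at hr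
            subst hr; exact pvInv_refl m fm
      · simp only [h2, Bool.false_eq_true, if_false, Option.some.injEq] at hr
        subst hr; exact pvInv_refl m fm

theorem pvTotList
    (rec : List (List Int) → List (Int × Int × Bool) → List (Int × Int × Bool) → Int → Int →
      Option (Int × List (List Int) × List (Int × Int × Bool) × List (Int × Int × Bool)))
    (hrec : ∀ m fm im cx cy r, rec m fm im cx cy = some r → pvInv m fm r.1 r.2.1 r.2.2.1)
    (N : Nat)
    (htot : ∀ m fm im cx cy, pvMu (List.map List.length m) fm < N → (rec m fm im cx cy).isSome) :
    ∀ (cs : List (Int × Int)) (m : List (List Int)) (fm im : List (Int × Int × Bool)),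
      pvMu (List.map List.length m) fm < N → (runAList rec cs m fm im).isSome := by
  intro cs
  induction cs with
  | nil => intro m fm im _; simp [runAList]
  | cons hd t ih =>
    obtain ⟨cx, cy⟩ := hd
    intro m fm im hmu
    have h1 : (rec m fm im cx cy).isSome := htot m fm im cx cy hmu
    cases hres : rec m fm im cx cy with
    | none => rw [hres] at h1; cases h1
    | some r1 =>
      obtain ⟨v, m1, fm1, im1⟩ := r1
      have hinv : pvInv m fm v m1 fm1 := hrec _ _ _ _ _ _ hres
      obtain ⟨d1, g1, n1, u1⟩ := hinv
      have hmu1 : pvMu (List.map List.length m1) fm1 < N := by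
        rw [d1]; omega
      have h2 := ih m1 fm1 im1 hmu1
      cases hres2 : runAList rec t m1 fm1 im1 with
      | none => rw [hres2] at h2; cases h2
      | some r2 =>
        obtain ⟨s, m2, fm2, im2⟩ := r2
        rw [runAList]
        simp only [hres, hres2]
        rfl

theorem pvTotA : ∀ (n : Nat) (m : List (List Int)) (fm im : List (Int × Int × Bool)) (x y : Int) (f : Bool),
    pvMu (List.map List.length m) fm < n → (runA n m fm im x y f).isSome := by
  intro n
  induction n with
  | zero => intro m fm im x y f h; omega
  | succ n ih =>
    intro m fm im x y f hmu
    rw [runA]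
    by_cases h1 : pvFmGet fm x y = true
    · simp [h1]
    · simp only [h1, Bool.false_eq_true, if_false]
      by_cases h2 : pvInB m x y = true
      · simp only [h2, if_true]
        by_cases h3 : (9 : Int) ≤ pvCell m x y
        · simp only [h3, if_true]
          have h2' := h2
          simp only [pvInB, Bool.and_eq_true, decide_eq_true_eq] at h2'
          obtain ⟨⟨⟨hy0, hyl⟩, hx0⟩, hxl⟩ := h2'
          have hyN : y.toNat < m.length := by omega
          have hyN' : y.toNat < (List.map List.length m).length := by simpa using hyN
          have hxN : x.toNat < (List.map List.length m).getD y.toNat 0 := by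
            rw [pvDs_getD m y.toNat hyN]; omega
          have hset := pvMu_set_lt (List.map List.length m) fm x y hy0 hyN' hx0 hxN
            (by simpa using h1)
          have htl := pvTotList (fun m' fm' im' cx cy => runA n m' fm' im' cx cy true)
            (fun m fm im cx cy r hrc => pvInvA n m fm im cx cy true r hrc) n
            (fun m fm im cx cy h => ih m fm im cx cy true h)
            (pvNbrs x y) m (pvFmSet fm x y true) im (by omega)
          cases hres : runAList (fun m' fm' im' cx cy => runA n m' fm' im' cx cy true)
              (pvNbrs x y) m (pvFmSet fm x y true) im with
          | none => rw [hres] at htl; cases htl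
          | some r1 =>
            obtain ⟨s, m', fm', im'⟩ := r1
            simp only [hres]
            rfl
        · simp only [h3, if_false]
          split_ifs <;> simp
      · simp [h2]

theorem pvRunB_mono : ∀ (n : Nat) (stack : List (Int × Int × Bool)) (m : List (List Int))
    (fm im : List (Int × Int × Bool)) (c : Int) r,
    runB n stack m fm im c = some r → runB (n + 1) stack m fm im c = some r := by
  intro n
  induction n with
  | zero => intro stack m fm im c r h; cases h
  | succ n ih =>
    intro stack m fm im c r h
    cases stack with
    | nil => rw [runB] at h ⊢; exact h
    | cons hd t =>
      obtain ⟨x, y, f⟩ := hd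
      rw [runB] at h
      rw [runB]
      split_ifs at h ⊢ <;> exact ih _ _ _ _ _ _ h

theorem pvRunB_le (a : Nat) : ∀ (k : Nat), a ≤ k →
    ∀ (stack : List (Int × Int × Bool)) (m : List (List Int))
      (fm im : List (Int × Int × Bool)) (c : Int) r,
    runB a stack m fm im c = some r → runB k stack m fm im c = some r := by
  intro k hk
  induction k, hk using Nat.le_induction with
  | base => intro stack m fm im c r h; exact h
  | succ k hk ih => intro stack m fm im c r h; exact pvRunB_mono k _ _ _ _ _ _ (ih _ _ _ _ _ _ h)

theorem pvNbrs_length (x y : Int) : (pvNbrs x y).length = 9 := rfl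

theorem pvSimList
    (rec : List (List Int) → List (Int × Int × Bool) → List (Int × Int × Bool) → Int → Int →
      Option (Int × List (List Int) × List (Int × Int × Bool) × List (Int × Int × Bool)))
    (hsim : ∀ m fm im cx cy v m' fm' im', rec m fm im cx cy = some (v, m', fm', im') →
      0 ≤ v ∧ ∀ rest acc mm res, runB mm rest m' fm' im' (acc + v) = some res →
        runB (mm + 1 + 9 * v.toNat) ((cx, cy, true) :: rest) m fm im acc = some res) :
    ∀ (cs : List (Int × Int)) (m : List (List Int)) (fm im : List (Int × Int × Bool))
      (s : Int) (m' : List (List Int)) (fm' im' : List (Int × Int × Bool)),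
      runAList rec cs m fm im = some (s, m', fm', im') →
      0 ≤ s ∧ ∀ rest acc mm res, runB mm rest m' fm' im' (acc + s) = some res →
        runB (mm + cs.length + 9 * s.toNat) (cs.map (fun p => (p.1, p.2, true)) ++ rest) m fm im acc = some res := by
  intro cs
  induction cs with
  | nil =>
    intro m fm im s m' fm' im' hr
    simp only [runAList, Option.some.injEq, Prod.mk.injEq] at hr
    obtain ⟨h1, h2, h3, h4⟩ := hr
    subst h1; subst h2; subst h3; subst h4
    refine ⟨le_refl 0, fun rest acc mm res h => ?_⟩
    simpa using h
  | cons hd t ih =>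
    obtain ⟨cx, cy⟩ := hd
    intro m fm im s m' fm' im' hr
    rw [runAList] at hr
    cases h1 : rec m fm im cx cy with
    | none => simp only [h1] at hr; exact absurd hr (by simp)
    | some r1 =>
      obtain ⟨v, m1, fm1, im1⟩ := r1
      simp only [h1] at hr
      cases h2 : runAList rec t m1 fm1 im1 with
      | none => simp only [h2] at hr; exact absurd hr (by simp)
      | some r2 =>
        obtain ⟨s', m2, fm2, im2⟩ := r2
        simp only [h2, Option.some.injEq, Prod.mk.injEq] at hr
        obtain ⟨hs, hm2, hfm2, him2⟩ := hr
        subst hm2; subst hfm2; subst him2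
        obtain ⟨hv0, hsimv⟩ := hsim _ _ _ _ _ _ _ _ _ h1
        obtain ⟨hs0, hsiml⟩ := ih _ _ _ _ _ _ _ h2
        constructor
        · omega
        · intro rest acc mm res h
          have h' : runB mm rest m2 fm2 im2 ((acc + v) + s') = some res := by
            have he : acc + s = (acc + v) + s' := by rw [← hs]; ring
            rw [← he]; exact h
          have step1 := hsiml rest (acc + v) mm res h'
          have step2 := hsimv ((t.map (fun p => (p.1, p.2, true))) ++ rest) acc
            (mm + t.length + 9 * s'.toNat) res step1
          have hfe : mm + ((cx, cy) :: t).length + 9 * s.toNat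
              = mm + t.length + 9 * s'.toNat + 1 + 9 * v.toNat := by
            simp only [List.length_cons]
            have : s = v + s' := hs.symm
            omega
          rw [hfe]
          simpa using step2

theorem pvSimA : ∀ (n : Nat) (m : List (List Int)) (fm im : List (Int × Int × Bool)) (x y : Int) (f : Bool)
    (v : Int) (m' : List (List Int)) (fm' im' : List (Int × Int × Bool)),
    runA n m fm im x y f = some (v, m', fm', im') →
    ∀ rest acc mm res, runB mm rest m' fm' im' (acc + v) = some res →
      runB (mm + 1 + 9 * v.toNat) ((x, y, f) :: rest) m fm im acc = some res := by
  intro n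
  induction n with
  | zero => intro m fm im x y f v m' fm' im' hr; cases hr
  | succ n ih =>
    intro m fm im x y f v m' fm' im' hr rest acc mm res h
    rw [runA] at hr
    by_cases h1 : pvFmGet fm x y = true
    · simp only [h1, if_true, Option.some.injEq, Prod.mk.injEq] at hr
      obtain ⟨hv, hm, hfm, him⟩ := hr
      subst hv; subst hm; subst hfm; subst him
      have he : mm + 1 + 9 * (0 : Int).toNat = mm + 1 := by omega
      rw [he, runB]
      simp only [h1, if_true]
      simpa using h
    · simp only [h1, Bool.false_eq_true, if_false] at hr
      by_cases h2 : pvInB m x y = true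
      · simp only [h2, if_true] at hr
        by_cases h3 : (9 : Int) ≤ pvCell m x y
        · simp only [h3, if_true] at hr
          cases hres : runAList (fun m' fm' im' cx cy => runA n m' fm' im' cx cy true)
              (pvNbrs x y) m (pvFmSet fm x y true) im with
          | none => simp only [hres] at hr; exact absurd hr (by simp)
          | some r1 =>
            obtain ⟨s, ma, fma, ima⟩ := r1
            simp only [hres, Option.some.injEq, Prod.mk.injEq] at hr
            obtain ⟨hv, hm, hfm, him⟩ := hr
            subst hm; subst hfm; subst him
            obtain ⟨hs0, hsiml⟩ := pvSimList _
              (fun m fm im cx cy v m' fm' im' hrc =>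
                ⟨(pvInvA n m fm im cx cy true (v, m', fm', im') hrc).2.2.1,
                 ih m fm im cx cy true v m' fm' im' hrc⟩)
              (pvNbrs x y) m (pvFmSet fm x y true) im s ma fma ima hres
            have h' : runB mm rest ma fma ima ((acc + 1) + s) = some res := by
              have he : acc + v = (acc + 1) + s := by rw [← hv]; ring
              rw [← he]; exact h
            have step := hsiml rest (acc + 1) mm res h'
            rw [pvNbrs_length] at step
            have hfe : mm + 1 + 9 * v.toNat = (mm + 9 + 9 * s.toNat) + 1 := by
              have : v = s + 1 := hv.symm
              omega
            rw [hfe, runB]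
            simp only [h1, Bool.false_eq_true, if_false, h2, h3, decide_true, Bool.and_self, if_true]
            simpa using step
        · simp only [h3, if_false] at hr
          have hb2 : (pvInB m x y && decide ((9 : Int) ≤ pvCell m x y)) = false := by
            simp [h3]
          by_cases h4 : (f || !(pvFmGet im x y)) = true
          · simp only [h4, if_true] at hr
            have hb3 : (pvInB m x y && (f || !(pvFmGet im x y))) = true := by
              rw [h2, h4]; rfl
            cases f with
            | true =>
              simp only [if_true, Option.some.injEq, Prod.mk.injEq] at hr
              obtain ⟨hv, hm, hfm, him⟩ := hr
              subst hv; subst hm; subst hfm; subst him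
              have he : mm + 1 + 9 * (0 : Int).toNat = mm + 1 := by omega
              rw [he, runB]
              simp only [h1, Bool.false_eq_true, if_false, hb2, hb3, if_true]
              simpa using h
            | false =>
              simp only [Bool.false_eq_true, if_false, Option.some.injEq, Prod.mk.injEq] at hr
              obtain ⟨hv, hm, hfm, him⟩ := hr
              subst hv; subst hm; subst hfm; subst him
              have he : mm + 1 + 9 * (0 : Int).toNat = mm + 1 := by omega
              rw [he, runB]
              simp only [h1, Bool.false_eq_true, if_false, hb2, hb3, if_true]
              simpa using h
          · simp only [h4, Bool.false_eq_true, if_false, Option.some.injEq, Prod.mk.injEq] at hr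
            obtain ⟨hv, hm, hfm, him⟩ := hr
            subst hv; subst hm; subst hfm; subst him
            have hb3 : (pvInB m x y && (f || !(pvFmGet im x y))) = false := by
              simp only [Bool.not_eq_true] at h4
              rw [h4]; simp
            have he : mm + 1 + 9 * (0 : Int).toNat = mm + 1 := by omega
            rw [he, runB]
            simp only [h1, Bool.false_eq_true, if_false, hb2, hb3]
            simpa using h
      · simp only [h2, Bool.false_eq_true, if_false, Option.some.injEq, Prod.mk.injEq] at hr
        obtain ⟨hv, hm, hfm, him⟩ := hr
        subst hv; subst hm; subst hfm; subst him
        have hb2 : (pvInB m x y && decide ((9 : Int) ≤ pvCell m x y)) = false := by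
          simp only [Bool.not_eq_true] at h2
          rw [h2]; simp
        have hb3 : (pvInB m x y && (f || !(pvFmGet im x y))) = false := by
          simp only [Bool.not_eq_true] at h2
          rw [h2]; simp
        have he : mm + 1 + 9 * (0 : Int).toNat = mm + 1 := by omega
        rw [he, runB]
        simp only [h1, Bool.false_eq_true, if_false, hb2, hb3]
        simpa using h

-- ===== VERDICT (by name: the statement is the Claim_ definition above) =====
theorem increase_energy_spec : Claim_equal_increase_energy := by
  intro map x y flashed_map increased_map forced _
  unfold Spec_increase_energy increase_energy increase_energy_alt
  have htot := pvTotA (pvMu (List.map List.length map) flashed_map + 1) map flashed_map increased_map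
    x y forced (by omega)
  cases hres : runA (pvMu (List.map List.length map) flashed_map + 1) map flashed_map increased_map x y forced with
  | none => rw [hres] at htot; cases htot
  | some r =>
    obtain ⟨c, m', fm', im'⟩ := r
    have hinv : pvInv map flashed_map c m' fm' := pvInvA _ _ _ _ _ _ _ _ hres
    obtain ⟨d1, g1, n1, u1⟩ := hinv
    have hbase : runB 1 ([] : List (Int × Int × Bool)) m' fm' im' (0 + c) = some (c, m', fm', im') := by
      rw [runB]; norm_num
    have hsim := pvSimA _ _ _ _ _ _ _ _ _ _ _ hres [] 0 1 (c, m', fm', im') hbase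
    have hle : 1 + 1 + 9 * c.toNat ≤ 9 * pvMu (List.map List.length map) flashed_map + 2 := by
      omega
    have hB := pvRunB_le _ _ hle _ _ _ _ _ _ hsim
    simp only [hres]
    rw [hB]
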